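-- pv_equiv track=rewrite | github.com/apatnaik0/LeetCode | 3277-find-the-number-of-ways-to-place-people-ii/find-the-number-of-ways-to-place-people-ii.py | numberOfPairs
-- ===== SOURCE A (Python) =====
-- from typing import List
--
-- def numberOfPairs(points: List[List[int]]) -> int:
--     points.sort(key = lambda x: (x[0],-x[1]))
--     ans = 0
--     n = len(points)
--     for i in range(n-1):
--         x1,y1 = points[i]
--         prev = float('-inf')
--         for j in range(i+1,n):
--             x2,y2 = points[j]
--             if prev < y2 <= y1:
--                 ans += 1
--                 prev = y2
--             if prev == y1:
--                 break
--     return ans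
-- ===== SOURCE B (Python) =====
-- def numberOfPairs(points):
--     # Pair-by-pair rectangle-emptiness check over the (x asc, y desc)-sorted
--     # list, instead of A's running-maximum sweep.  Does not mutate `points`.
--     pts = sorted(points, key=lambda p: (p[0], -p[1]))
--     n = len(pts)
--     ans = 0
--     for i in range(n):
--         xi, yi = pts[i]
--         for j in range(i + 1, n):
--             xj, yj = pts[j]
--             if yj <= yi and all(not (yj <= pts[k][1] <= yi) for k in range(i + 1, j)):
--                 ans += 1
--     return ans
-- ===== Notes on version B (the rewrite author's own statement) =====
-- stated objective: alternative
-- what changed: Replaces A's stateful running-maximum sweep (with early break) by a direct per-pair test: after the same (x asc, y desc) sort, a pair (i,j) is counted iff y_j <= y_i and no point strictly between them in sorted order has y in [y_j, y_i]; B also does not mutate the input list where A sorts it in place.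
-- outside the precondition, e.g. on numberOfPairs([[1, 2, 3]]): A returns 0, B raises ValueError
import Mathlib
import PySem

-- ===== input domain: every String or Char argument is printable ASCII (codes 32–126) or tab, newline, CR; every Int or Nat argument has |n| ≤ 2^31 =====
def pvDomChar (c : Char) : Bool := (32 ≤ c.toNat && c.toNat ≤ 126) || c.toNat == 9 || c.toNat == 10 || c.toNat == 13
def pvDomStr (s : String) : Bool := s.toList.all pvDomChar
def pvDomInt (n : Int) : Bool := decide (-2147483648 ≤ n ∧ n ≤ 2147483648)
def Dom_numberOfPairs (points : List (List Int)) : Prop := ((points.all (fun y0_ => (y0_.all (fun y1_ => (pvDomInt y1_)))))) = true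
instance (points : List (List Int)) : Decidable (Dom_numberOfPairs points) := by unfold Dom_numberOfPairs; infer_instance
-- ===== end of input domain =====

-- B replaces A's running-maximum sweep by an explicit per-pair rectangle-emptiness
-- check (objective: simpler to see correct, same result).  NOTE: Python A sorts
-- `points` in place (observable mutation); Python B does not — the equivalence
-- proved here is about the RETURN value only.

-- ===== PORT A =====
-- 'x1,y1 = points[i]' / 'x[0]' / '-x[1]' on a length-2 list (Pre_ guarantees the
-- shape wherever Python evaluates these):
def pvX (p : List Int) : Int := match p with | x :: _ => x | _ => 0
def pvY (p : List Int) : Int := match p with | _ :: y :: _ => y | _ => 0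

-- prev = float('-inf') ported as Option Int (none = -inf); 'prev < y2'
def pvNegInfLt (prev : Option Int) (y : Int) : Bool :=
  match prev with | none => true | some m => decide (m < y)

-- the inner 'for j in range(i+1, n)' loop with its break
def pvInnerA (y1 : Int) : List (List Int) → Option Int → Int
  | [], _ => 0
  | p :: rest, prev =>
      if pvNegInfLt prev (pvY p) && decide (pvY p ≤ y1) then
        -- counted: ans += 1, prev = y2; then the 'if prev == y1: break' test
        (if pvY p = y1 then 1 else 1 + pvInnerA y1 rest (some (pvY p)))
      else
        (if prev = some y1 then 0 else 0 + pvInnerA y1 rest prev)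

-- the outer 'for i in range(n-1)' loop (the skipped last i contributes 0)
def pvOuterA : List (List Int) → Int
  | [] => 0
  | p :: rest => pvInnerA (pvY p) rest none + pvOuterA rest

def numberOfPairs (points : List (List Int)) : Int :=
  pvOuterA (PySem.List.sorted2 points (fun p => pvX p) (fun p => -(pvY p)))

-- ===== PORT B =====
-- 'all(not (y2 <= pts[k][1] <= y1) for k in range(i+1, j))'
def pvEmptyOK (y2 y1 : Int) (mid : List (List Int)) : Bool :=
  mid.all (fun p => !(decide (y2 ≤ pvY p) && decide (pvY p ≤ y1)))

-- inner 'for j' loop; mid = the points strictly between i and the current j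
def pvScanJ (y1 : Int) : List (List Int) → List (List Int) → Int
  | _, [] => 0
  | mid, p :: rest =>
      (if decide (pvY p ≤ y1) && pvEmptyOK (pvY p) y1 mid then 1 else 0)
        + pvScanJ y1 (mid ++ [p]) rest

def pvOuterB : List (List Int) → Int
  | [] => 0
  | p :: rest => pvScanJ (pvY p) [] rest + pvOuterB rest

def numberOfPairs_alt (points : List (List Int)) : Int :=
  pvOuterB (PySem.List.sorted2 points (fun p => pvX p) (fun p => -(pvY p)))

-- ===== PRECONDITION & SPEC =====
-- Pre_ excludes malformed point lists whose entries are not [x, y] pairs: on those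
-- A either raises (sort key / tuple unpack) or, degenerately (≤ 1 point with extra
-- coordinates), returns 0 where B's unpack raises.
def Pre_numberOfPairs (points : List (List Int)) : Prop :=
  ∀ p ∈ points, p.length = 2
instance (points : List (List Int)) : Decidable (Pre_numberOfPairs points) := by
  unfold Pre_numberOfPairs; infer_instance

def pvWitness_numberOfPairs : List (List Int) := [[1, 2], [3, 4], [3, 1]]

def Spec_numberOfPairs (points : List (List Int)) (out : Int) : Prop := out = numberOfPairs_alt points
instance (points : List (List Int)) (out : Int) : Decidable (Spec_numberOfPairs points out) := by unfold Spec_numberOfPairs; infer_instance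

-- ===== CLAIM (what is proved, stated in full; the proofs are below) =====
def Claim_equal_numberOfPairs : Prop := ∀ (points : List (List Int)), Dom_numberOfPairs points → Pre_numberOfPairs points → Spec_numberOfPairs points (numberOfPairs points)

-- ===== LEMMAS AND PROOFS =====

-- Loop invariant tying A's running maximum `prev` to B's accumulated strip `mid`:
-- prev = max of the y-values in mid that are ≤ y1 (none if there are none).
def pvInv (y1 : Int) (prev : Option Int) (mid : List (List Int)) : Prop :=
  match prev with
  | none => ∀ p ∈ mid, y1 < pvY p
  | some m => m ≤ y1 ∧ (∃ p ∈ mid, pvY p = m) ∧ ∀ p ∈ mid, pvY p ≤ y1 → pvY p ≤ m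

-- once some point in mid has y-value exactly y1, no later j is ever counted by B
lemma pvScanJ_zero (y1 : Int) (rest : List (List Int)) :
    ∀ mid, (∃ p ∈ mid, pvY p = y1) → pvScanJ y1 mid rest = 0 := by
  induction rest with
  | nil => intro mid _; rfl
  | cons p rest ih =>
      intro mid ⟨q, hq, hqy⟩
      simp only [pvScanJ]
      have h0 : (decide (pvY p ≤ y1) && pvEmptyOK (pvY p) y1 mid) = false := by
        by_cases h : pvY p ≤ y1
        · have : pvEmptyOK (pvY p) y1 mid = false := by
            simp only [pvEmptyOK, List.all_eq_false]
            exact ⟨q, hq, by simp [hqy, h]⟩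
          simp [this]
        · simp [h]
      rw [h0, ih (mid ++ [p]) ⟨q, by simp [hq], hqy⟩]
      simp

-- under the invariant, A's count condition coincides with B's emptiness condition
lemma pvCond_eq (y1 y2 : Int) (prev : Option Int) (mid : List (List Int))
    (hinv : pvInv y1 prev mid) :
    (pvNegInfLt prev y2 && decide (y2 ≤ y1)) = (decide (y2 ≤ y1) && pvEmptyOK y2 y1 mid) := by
  by_cases hy : y2 ≤ y1
  · rcases prev with _ | m
    · have : pvEmptyOK y2 y1 mid = true := by
        simp only [pvEmptyOK, List.all_eq_true]
        intro p hp
        have := hinv p hp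
        simp; omega
      simp [pvNegInfLt, hy, this]
    · obtain ⟨hm1, ⟨q, hq, hqy⟩, hmax⟩ := hinv
      by_cases hlt : m < y2
      · have : pvEmptyOK y2 y1 mid = true := by
          simp only [pvEmptyOK, List.all_eq_true]
          intro p hp
          by_cases hp1 : pvY p ≤ y1
          · have := hmax p hp hp1; simp; omega
          · simp; omega
        simp [pvNegInfLt, hy, hlt, this]
      · have : pvEmptyOK y2 y1 mid = false := by
          simp only [pvEmptyOK, List.all_eq_false]
          exact ⟨q, hq, by simp [hqy]; omega⟩
        simp [pvNegInfLt, hy, hlt, this]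
  · simp [hy]

-- main loop equivalence: A's inner sweep = B's inner scan, under the invariant
lemma pvInner_eq (y1 : Int) (rest : List (List Int)) :
    ∀ prev mid, pvInv y1 prev mid → pvInnerA y1 rest prev = pvScanJ y1 mid rest := by
  induction rest with
  | nil => intro prev mid _; rfl
  | cons p rest ih =>
      intro prev mid hinv
      simp only [pvInnerA, pvScanJ]
      rw [← pvCond_eq y1 (pvY p) prev mid hinv]
      by_cases hc : (pvNegInfLt prev (pvY p) && decide (pvY p ≤ y1)) = true
      · -- counted
        have hy2 : pvY p ≤ y1 := by
          have := hc; simp only [Bool.and_eq_true, decide_eq_true_eq] at this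
          exact this.2
        rw [hc, if_pos rfl]
        by_cases heq : pvY p = y1
        · rw [if_pos heq, pvScanJ_zero y1 rest (mid ++ [p]) ⟨p, by simp, heq⟩]
          simp
        · rw [if_neg heq]
          have hstep : pvInnerA y1 rest (some (pvY p)) = pvScanJ y1 (mid ++ [p]) rest := by
            refine ih (some (pvY p)) (mid ++ [p]) ⟨hy2, ⟨p, by simp, rfl⟩, ?_⟩
            intro q hq hq1
            rcases List.mem_append.mp hq with hq' | hq'
            · rcases prev with _ | m
              · exact absurd hq1 (by have := hinv q hq'; omega)
              · have hml : m < pvY p := by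
                  have := hc; simp only [Bool.and_eq_true] at this
                  simpa [pvNegInfLt] using this.1
                have := hinv.2.2 q hq' hq1
                omega
            · simp at hq'; simp [hq']
          rw [hstep]
          simp
      · -- not counted
        rw [Bool.not_eq_true] at hc
        rw [hc, if_neg (by simp)]
        by_cases hbrk : prev = some y1
        · rw [if_pos hbrk]
          have hw : ∃ q ∈ mid ++ [p], pvY q = y1 := by
            subst hbrk
            obtain ⟨_, ⟨q, hq, hqy⟩, _⟩ := hinv
            exact ⟨q, by simp [hq], hqy⟩
          rw [pvScanJ_zero y1 rest (mid ++ [p]) hw]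
          simp
        · rw [if_neg hbrk]
          have hstep : pvInnerA y1 rest prev = pvScanJ y1 (mid ++ [p]) rest := by
            refine ih prev (mid ++ [p]) ?_
            rcases prev with _ | m
            · intro q hq
              rcases List.mem_append.mp hq with hq' | hq'
              · exact hinv q hq'
              · simp at hq'; subst hq'
                have : ¬ (pvY q ≤ y1) := by
                  intro h
                  simp [pvNegInfLt, h] at hc
                omega
            · obtain ⟨hm1, ⟨q, hq, hqy⟩, hmax⟩ := hinv
              refine ⟨hm1, ⟨q, by simp [hq], hqy⟩, ?_⟩
              intro r hr hr1
              rcases List.mem_append.mp hr with hr' | hr'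
              · exact hmax r hr' hr1
              · simp at hr'; subst hr'
                have : ¬ (m < pvY r) := by
                  intro h
                  simp [pvNegInfLt, h, hr1] at hc
                omega
          rw [hstep]
          simp

-- outer loops agree on any list
lemma pvOuter_eq (l : List (List Int)) : pvOuterA l = pvOuterB l := by
  induction l with
  | nil => rfl
  | cons p rest ih =>
      simp only [pvOuterA, pvOuterB, ih]
      have := pvInner_eq (pvY p) rest none [] (by intro q hq; simp at hq)
      rw [this]

-- ===== VERDICT (by name: the statement is the Claim_ definition above) =====
theorem numberOfPairs_spec : Claim_equal_numberOfPairs := by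
  intro points _ _
  unfold Spec_numberOfPairs numberOfPairs numberOfPairs_alt
  exact pvOuter_eq _
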